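-- pv_equiv track=rewrite | github.com/jamditis/audiobash | security-lab/detection/ja4_extractor.py | get_alpn_code
-- ===== SOURCE A (Python) =====
-- def get_alpn_code(alpn_protocols: list[str]) -> str:
--     """
--     Extract ALPN code (first and last alphanumeric char).
--
--     Examples:
--         'h2' -> 'h2'
--         'http/1.1' -> 'h1'
--         'grpc' -> 'gc'
--     """
--     if not alpn_protocols:
--         return "00"
--
--     first_proto = alpn_protocols[0]
--     alphanumeric = ''.join(c for c in first_proto if c.isalnum())
--
--     if len(alphanumeric) >= 2:
--         return alphanumeric[0] + alphanumeric[-1]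
--     elif len(alphanumeric) == 1:
--         return alphanumeric[0] + alphanumeric[0]
--     else:
--         return "00"
-- ===== SOURCE B (Python) =====
-- def get_alpn_code(alpn_protocols: list[str]) -> str:
--     """Extract ALPN code without building the filtered string: scan forward for
--     the first alphanumeric char and backward for the last one."""
--     if not alpn_protocols:
--         return "00"
--     s = alpn_protocols[0]
--     first = next((c for c in s if c.isalnum()), None)
--     last = next((c for c in reversed(s) if c.isalnum()), None)
--     if first is None or last is None:
--         return "00"
--     return first + last
-- ===== Notes on version B (the rewrite author's own statement) =====
-- stated objective: alternative
-- what changed: Instead of materialising the full filtered alphanumeric string and branching on its length, B scans forward for the first alphanumeric character and backward (reversed) for the last, returning '00' when none exists; the length-1 case falls out since both scans find the same char.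
import Mathlib
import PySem

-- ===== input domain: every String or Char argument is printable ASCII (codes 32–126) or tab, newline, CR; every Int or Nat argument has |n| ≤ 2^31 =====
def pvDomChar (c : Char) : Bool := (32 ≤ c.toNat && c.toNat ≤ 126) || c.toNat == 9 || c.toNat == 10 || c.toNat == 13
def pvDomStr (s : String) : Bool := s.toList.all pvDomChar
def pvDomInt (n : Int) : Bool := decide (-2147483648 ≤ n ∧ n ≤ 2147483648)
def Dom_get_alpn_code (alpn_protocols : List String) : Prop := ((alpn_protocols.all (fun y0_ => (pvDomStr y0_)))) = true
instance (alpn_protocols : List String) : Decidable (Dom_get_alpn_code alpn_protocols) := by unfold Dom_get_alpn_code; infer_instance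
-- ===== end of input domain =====

-- B scans forward for the first alphanumeric char and backward for the last one
-- instead of building the filtered string and branching on its length (objective: alternative).

-- ===== PORT A =====
def get_alpn_code (alpn_protocols : List String) : String :=
  match alpn_protocols with
  | [] => "00"
  | first_proto :: _ =>
    let alphanumeric := first_proto.toList.filter (fun c => PySem.Chars.isalnum c)
    if alphanumeric.length ≥ 2 then
      String.mk [alphanumeric.headI, alphanumeric.getLastI]
    else if alphanumeric.length = 1 then
      String.mk [alphanumeric.headI, alphanumeric.headI]
    else
      "00"

-- ===== PORT B =====
def get_alpn_code_alt (alpn_protocols : List String) : String :=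
  match alpn_protocols with
  | [] => "00"
  | s :: _ =>
    match s.toList.find? (fun c => PySem.Chars.isalnum c),
          s.toList.reverse.find? (fun c => PySem.Chars.isalnum c) with
    | some f, some g => String.mk [f, g]
    | _, _ => "00"

-- ===== PRECONDITION & SPEC =====
def Spec_get_alpn_code (alpn_protocols : List String) (out : String) : Prop := out = get_alpn_code_alt alpn_protocols
instance (alpn_protocols : List String) (out : String) : Decidable (Spec_get_alpn_code alpn_protocols out) := by unfold Spec_get_alpn_code; infer_instance

-- ===== CLAIM (what is proved, stated in full; the proofs are below) =====
def Claim_equal_get_alpn_code : Prop := ∀ (alpn_protocols : List String), Dom_get_alpn_code alpn_protocols → Spec_get_alpn_code alpn_protocols (get_alpn_code alpn_protocols)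

-- ===== LEMMAS AND PROOFS =====

-- find? is the head of the filtered list; find? on the reverse is its last element.
theorem pv_find?_eq_head?_filter {α : Type} (p : α → Bool) (l : List α) :
    l.find? p = (l.filter p).head? := by
  induction l with
  | nil => rfl
  | cons a t ih =>
    rw [List.find?_cons, List.filter_cons]
    by_cases h : p a
    · simp only [h, if_true, List.head?_cons]
    · simp only [h, if_false, Bool.false_eq_true, ih]

theorem pv_find?_reverse_eq_getLast?_filter {α : Type} (p : α → Bool) (l : List α) :
    l.reverse.find? p = (l.filter p).getLast? := by
  rw [pv_find?_eq_head?_filter, List.filter_reverse, List.head?_reverse]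

theorem get_alpn_code_spec : Claim_equal_get_alpn_code := by
  intro alpn_protocols _
  unfold Spec_get_alpn_code get_alpn_code get_alpn_code_alt
  cases alpn_protocols with
  | nil => rfl
  | cons s rest =>
    simp only
    rw [pv_find?_eq_head?_filter, pv_find?_reverse_eq_getLast?_filter]
    generalize s.toList.filter (fun c => PySem.Chars.isalnum c) = F
    match F with
    | [] => rfl
    | [a] => rfl
    | a :: b :: t =>
      cases h : (b :: t).getLast? with
      | none => simp at h
      | some g =>
        simp [List.headI, List.getLastI_eq_getLast?, List.getLast?_cons_cons, h]
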